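-- pv_equiv track=rewrite | github.com/ppark109/ai-flowops | agents/evidence.py | _ordered_fields
-- ===== SOURCE A (Python) =====
-- def _ordered_fields(
--     field_map: dict[str, tuple[str, str]], preferred_sources: list[str]
-- ) -> list[tuple[str, str]]:
--     fields = list(field_map.values())
--     if not preferred_sources:
--         return fields
--     preferred = [
--         field
--         for source in preferred_sources
--         for field in fields
--         if field[0] == source
--     ]
--     remainder = [field for field in fields if field[0] not in preferred_sources]
--     return preferred + remainder
-- ===== SOURCE B (Python) =====
-- def _ordered_fields(field_map, preferred_sources):
--     fields = list(field_map.values())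
--     groups = {}
--     for field in fields:
--         groups.setdefault(field[0], []).append(field)
--     pref_set = set(preferred_sources)
--     out = []
--     for source in preferred_sources:
--         out += groups.get(source, [])
--     for field in fields:
--         if field[0] not in pref_set:
--             out.append(field)
--     return out
-- ===== Notes on version B (the rewrite author's own statement) =====
-- stated objective: faster
-- what changed: B groups the fields by source into a dict in one pass and looks each preferred source up, instead of rescanning the whole field list for every preferred source, and uses a set for the remainder membership test.
import Mathlib
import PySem

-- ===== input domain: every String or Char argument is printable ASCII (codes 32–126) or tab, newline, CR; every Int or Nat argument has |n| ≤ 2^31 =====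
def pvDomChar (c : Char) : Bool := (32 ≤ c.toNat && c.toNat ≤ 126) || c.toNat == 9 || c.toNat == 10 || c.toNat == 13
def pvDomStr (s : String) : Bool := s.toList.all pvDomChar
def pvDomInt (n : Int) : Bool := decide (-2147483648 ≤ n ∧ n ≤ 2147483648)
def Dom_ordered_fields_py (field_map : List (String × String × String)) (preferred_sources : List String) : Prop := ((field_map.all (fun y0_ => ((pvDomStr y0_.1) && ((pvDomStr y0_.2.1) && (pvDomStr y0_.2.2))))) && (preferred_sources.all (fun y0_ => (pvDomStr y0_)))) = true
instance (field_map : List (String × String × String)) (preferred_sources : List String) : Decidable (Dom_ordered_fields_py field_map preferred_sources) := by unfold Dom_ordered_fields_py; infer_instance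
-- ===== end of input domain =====

-- B replaces A's rescan of the whole field list per preferred source by one grouping pass
-- over the fields plus a dict lookup per source (and a set for the remainder test): faster (asymptotic, O(n*m) → O(n+m)).

-- ===== PORT A =====
def ordered_fields_py (field_map : List (String × String × String)) (preferred_sources : List String) : List (String × String) :=
  let fields := (PySem.Dict.ofList field_map).values
  if preferred_sources = [] then fields
  else
    let preferred := preferred_sources.flatMap (fun source => fields.filter (fun field => field.1 == source))
    let remainder := fields.filter (fun field => !(preferred_sources.contains field.1))
    preferred ++ remainder

-- ===== PORT B =====
def ordered_fields_py_alt (field_map : List (String × String × String)) (preferred_sources : List String) : List (String × String) :=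
  let fields := (PySem.Dict.ofList field_map).values
  let groups := fields.foldl (fun d field => d.modify field.1 [] (fun l => l ++ [field])) PySem.Dict.empty
  let prefSet := PySem.Set.ofList preferred_sources
  let out := preferred_sources.foldl (fun out source => out ++ groups.getD source []) []
  fields.foldl (fun out field => if !(PySem.Set.contains prefSet field.1) then out ++ [field] else out) out

-- ===== PRECONDITION & SPEC =====
def Spec_ordered_fields_py (field_map : List (String × String × String)) (preferred_sources : List String) (out : List (String × String)) : Prop := out = ordered_fields_py_alt field_map preferred_sources
instance (field_map : List (String × String × String)) (preferred_sources : List String) (out : List (String × String)) : Decidable (Spec_ordered_fields_py field_map preferred_sources out) := by unfold Spec_ordered_fields_py; infer_instance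

-- ===== CLAIM (what is proved, stated in full; the proofs are below) =====
def Claim_equal_ordered_fields_py : Prop := ∀ (field_map : List (String × String × String)) (preferred_sources : List String), Dom_ordered_fields_py field_map preferred_sources → Spec_ordered_fields_py field_map preferred_sources (ordered_fields_py field_map preferred_sources)

-- ===== LEMMAS AND PROOFS =====

-- B's grouping loop: looking a source up in the finished dict yields exactly the fields with that source, in order.
lemma group_getD (fields : List (String × String)) (d : PySem.Dict String (List (String × String))) (s : String) :
    (fields.foldl (fun d field => d.modify field.1 [] (fun l => l ++ [field])) d).getD s []
      = d.getD s [] ++ fields.filter (fun field => field.1 == s) := by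
  induction fields generalizing d with
  | nil => simp
  | cons f fs ih =>
    simp only [List.foldl_cons, ih, List.filter_cons]
    by_cases h : f.1 = s
    · subst h; simp [PySem.Dict.getD_modify_self]
    · simp [PySem.Dict.getD_modify_of_ne _ _ _ (Ne.symm h), h]

-- ===== VERDICT (by name: the statement is the Claim_ definition above) =====
theorem ordered_fields_py_spec : Claim_equal_ordered_fields_py := by
  intro fm ps _
  unfold Spec_ordered_fields_py ordered_fields_py ordered_fields_py_alt
  simp only [group_getD]
  simp only [PySem.List.foldl_append_eq_flatMap, List.nil_append]
  rw [show (fun (out : List (String × String)) (field : String × String) =>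
      if !(PySem.Set.contains (PySem.Set.ofList ps) field.1) then out ++ [field] else out)
    = (fun out field => if (fun f : String × String => !(ps.contains f.1)) field then out ++ [(fun x => x) field] else out) from by
      funext out f; simp]
  rw [PySem.List.foldl_append_if]
  by_cases h : ps = []
  · subst h; simp
  · simp [h]
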